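-- pv_equiv track=rewrite | github.com/Todd-Projects/Vocabulary-Trainer | quiz_mode.py | grading_dict
-- ===== SOURCE A (Python) =====
-- def grading_dict(percent):
--     grading_dict = {
--         90: "firstplace.gif",
--         80: "secondplace.gif",
--         65: "thirdplace.gif",
--         50: "fourthplace.gif",
--         0: "noplace.gif",
--     }
--     grades = list(grading_dict.keys())
--     for i in grades:
--         if percent >= i:
--             return grading_dict[i]
-- ===== SOURCE B (Python) =====
-- def grading_dict(percent):
--     thresholds = [0, 50, 65, 80, 90]
--     names = ["noplace.gif", "fourthplace.gif", "thirdplace.gif",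
--              "secondplace.gif", "firstplace.gif"]
--     lo, hi = 0, len(thresholds)
--     while lo < hi:  # binary search: insertion point of percent to the right
--         mid = (lo + hi) // 2
--         if percent < thresholds[mid]:
--             hi = mid
--         else:
--             lo = mid + 1
--     if lo == 0:
--         return None
--     return names[lo - 1]
-- ===== Notes on version B (the rewrite author's own statement) =====
-- stated objective: alternative
-- what changed: Replaced the descending linear scan over a dict's keys with a hand-rolled binary search (bisect_right) over an ascending threshold list indexing a parallel name list.
import Mathlib
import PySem

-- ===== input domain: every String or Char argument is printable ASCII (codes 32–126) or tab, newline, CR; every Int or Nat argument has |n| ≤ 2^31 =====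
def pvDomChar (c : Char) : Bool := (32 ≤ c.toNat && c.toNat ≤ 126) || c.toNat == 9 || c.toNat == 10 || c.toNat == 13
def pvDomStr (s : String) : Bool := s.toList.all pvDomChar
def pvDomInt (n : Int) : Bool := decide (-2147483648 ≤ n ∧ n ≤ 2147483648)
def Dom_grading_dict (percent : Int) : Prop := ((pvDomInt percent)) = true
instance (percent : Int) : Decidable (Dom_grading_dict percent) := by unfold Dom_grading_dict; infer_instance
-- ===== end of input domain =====

-- B replaces the descending key scan with a binary search over an ascending threshold table; equal return value everywhere.
-- ===== PORT A =====
-- loop 'for i in grades: if percent >= i: return grading_dict[i]' over the dict's keys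
def pvLoopA (d : PySem.Dict Int String) (percent : Int) : List Int → Option String
  | [] => none
  | i :: rest => if percent ≥ i then d.get? i else pvLoopA d percent rest

def pvDictA : PySem.Dict Int String :=
  (((((PySem.Dict.empty).insert 90 "firstplace.gif").insert 80 "secondplace.gif").insert 65 "thirdplace.gif").insert 50 "fourthplace.gif").insert 0 "noplace.gif"

def grading_dict (percent : Int) : Option String :=
  let grades := pvDictA.keys
  pvLoopA pvDictA percent grades

-- ===== PORT B =====
-- the while-loop of Source B: bisect_right on the ascending threshold list
def pvBisect (ts : List Int) (percent : Int) (lo hi : Nat) : Nat :=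
  if lo < hi then
    let mid := (lo + hi) / 2
    if percent < ts.getD mid 0 then pvBisect ts percent lo mid
    else pvBisect ts percent (mid + 1) hi
  else lo
termination_by hi - lo
decreasing_by all_goals omega

def grading_dict_alt (percent : Int) : Option String :=
  let thresholds : List Int := [0, 50, 65, 80, 90]
  let names : List String := ["noplace.gif", "fourthplace.gif", "thirdplace.gif", "secondplace.gif", "firstplace.gif"]
  let lo := pvBisect thresholds percent 0 thresholds.length
  if lo = 0 then none
  else PySem.List.pyGet? names ((lo : Int) - 1)

-- ===== PRECONDITION & SPEC =====
def Spec_grading_dict (percent : Int) (out : Option String) : Prop := out = grading_dict_alt percent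
instance (percent : Int) (out : Option String) : Decidable (Spec_grading_dict percent out) := by unfold Spec_grading_dict; infer_instance

-- ===== CLAIM (what is proved, stated in full; the proofs are below) =====
def Claim_equal_grading_dict : Prop := ∀ (percent : Int), Dom_grading_dict percent → Spec_grading_dict percent (grading_dict percent)

-- ===== LEMMAS AND PROOFS =====

-- ===== VERDICT (by name: the statement is the Claim_ definition above) =====
lemma pvBisect_eval (p : Int) : pvBisect [0,50,65,80,90] p 0 5 =
    if p < 0 then 0 else if p < 50 then 1 else if p < 65 then 2
    else if p < 80 then 3 else if p < 90 then 4 else 5 := by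
  simp [pvBisect]
  split_ifs <;> omega

theorem grading_dict_spec : Claim_equal_grading_dict := by
  intro p _
  unfold Spec_grading_dict grading_dict grading_dict_alt
  have hk : pvDictA.keys = [90, 80, 65, 50, 0] := by decide
  simp only [hk, pvLoopA, List.length_cons, List.length_nil]
  rw [show (0+1+1+1+1+1 : Nat) = 5 from rfl, pvBisect_eval]
  split_ifs <;> first | decide | omega | exact (‹False›).elim
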